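-- pv_equiv track=rewrite | github.com/PFUNKTHEO2/append-extra-points | bigquery/_archive/old_nepsac_rosters/nepsac_player_matcher.py | build_player_index
-- ===== SOURCE A (Python) =====
-- from typing import Dict, List, Tuple, Optional
--
-- def build_player_index(players: List[Dict]) -> Dict[str, List[Dict]]:
--     """Build an index by last name for faster lookups."""
--     index = {}
--     for p in players:
--         lastname = (p.get('lastName') or '').lower()[:3]  # First 3 chars of lastname
--         if lastname:
--             if lastname not in index:
--                 index[lastname] = []
--             index[lastname].append(p)
--     return index
-- ===== SOURCE B (Python) =====
-- from typing import Dict, List, Tuple, Optional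
--
-- def build_player_index(players: List[Dict]) -> Dict[str, List[Dict]]:
--     """Build an index by last name for faster lookups."""
--     def key(p):
--         return (p.get('lastName') or '').lower()[:3]
--     keys = dict.fromkeys(k for k in map(key, players) if k)
--     return {k: [p for p in players if key(p) == k] for k in keys}
-- ===== Notes on version B (the rewrite author's own statement) =====
-- stated objective: alternative
-- what changed: Replaces A's scatter-into-dict single pass (insert-empty-then-append per player) by a two-phase dedup-keys-then-group: dict.fromkeys over the nonempty 3-char keys, then a dict comprehension that filters the players for each key.
import Mathlib
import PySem

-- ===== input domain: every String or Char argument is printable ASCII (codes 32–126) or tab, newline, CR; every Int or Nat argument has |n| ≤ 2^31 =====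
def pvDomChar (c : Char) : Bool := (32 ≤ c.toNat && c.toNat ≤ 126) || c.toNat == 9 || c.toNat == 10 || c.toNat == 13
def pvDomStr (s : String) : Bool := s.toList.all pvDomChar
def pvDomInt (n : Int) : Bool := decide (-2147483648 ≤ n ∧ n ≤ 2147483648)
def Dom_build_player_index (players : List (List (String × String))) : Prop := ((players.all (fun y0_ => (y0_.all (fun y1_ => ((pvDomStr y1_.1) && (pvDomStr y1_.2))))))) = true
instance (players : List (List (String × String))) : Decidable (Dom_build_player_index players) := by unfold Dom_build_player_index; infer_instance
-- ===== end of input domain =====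

-- B replaces A's scatter-into-dict single pass by dedup-keys-then-group (a dict.fromkeys pass plus a
-- comprehension filtering per key): objective 'alternative', same observable result, no speed claim.

-- ===== PORT A =====
-- (p.get('lastName') or '').lower()[:3]  — shared by both ports (B's Python defines the same key function)
def pvKey (p : List (String × String)) : String :=
  PySem.Str.slice (PySem.Str.lower ((PySem.Dict.mk p).getD "lastName" "")) none (some 3)

def build_player_index (players : List (List (String × String))) : List (String × List (List (String × String))) :=
  (players.foldl (fun index p =>
    let lastname := pvKey p
    if lastname ≠ "" then
      let index1 := if index.contains lastname = false then index.insert lastname [] else index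
      index1.modify lastname [] (fun v => v ++ [p])
    else index) PySem.Dict.empty).items

-- ===== PORT B =====
def build_player_index_alt (players : List (List (String × String))) : List (String × List (List (String × String))) :=
  let keys := PySem.List.dedup ((players.map pvKey).filter (fun k => k ≠ ""))
  keys.map (fun k => (k, players.filter (fun p => pvKey p == k)))

-- ===== PRECONDITION & SPEC =====
def Spec_build_player_index (players : List (List (String × String))) (out : List (String × List (List (String × String)))) : Prop := out = build_player_index_alt players
instance (players : List (List (String × String))) (out : List (String × List (List (String × String)))) : Decidable (Spec_build_player_index players out) := by unfold Spec_build_player_index; infer_instance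

-- ===== CLAIM (what is proved, stated in full; the proofs are below) =====
def Claim_equal_build_player_index : Prop := ∀ (players : List (List (String × String))), Dom_build_player_index players → Spec_build_player_index players (build_player_index players)

-- ===== LEMMAS AND PROOFS =====

-- inserting an absent key with [] and then modifying it is the same as modifying with default []
lemma insert_then_modify (d : PySem.Dict String (List (List (String × String)))) (k : String)
    (f : List (List (String × String)) → List (List (String × String))) :
    (if d.contains k = false then d.insert k [] else d).modify k [] f = d.modify k [] f := by
  by_cases h : d.contains k = false
  · rw [if_pos h]
    simp [PySem.Dict.modify, PySem.Dict.getD_insert_self, PySem.Dict.insert_insert_self,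
      PySem.Dict.getD_of_not_contains, h]
  · rw [if_neg h]

-- A's loop equals the plain modify-loop over the players whose key is nonempty
set_option maxHeartbeats 1000000 in
lemma foldA_eq_foldM (ps : List (List (String × String)))
    (d : PySem.Dict String (List (List (String × String)))) :
    ps.foldl (fun index p =>
      let lastname := pvKey p
      if lastname ≠ "" then
        let index1 := if index.contains lastname = false then index.insert lastname [] else index
        index1.modify lastname [] (fun v => v ++ [p])
      else index) d
    = (ps.filter (fun p => pvKey p ≠ "")).foldl (fun d p => d.modify (pvKey p) [] (fun v => v ++ [p])) d := by
  have hfun : (fun (index : PySem.Dict String (List (List (String × String)))) p =>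
      let lastname := pvKey p
      if lastname ≠ "" then
        let index1 := if index.contains lastname = false then index.insert lastname [] else index
        index1.modify lastname [] (fun v => v ++ [p])
      else index)
      = (fun d p => if pvKey p = "" then d else d.modify (pvKey p) [] (fun v => v ++ [p])) := by
    funext d p
    by_cases h : pvKey p = ""
    · rw [if_pos h]
      exact if_neg (by simp [h])
    · rw [if_neg h]
      exact (if_pos (show pvKey p ≠ "" from h)).trans (insert_then_modify d (pvKey p) _)
  rw [hfun]
  induction ps generalizing d with
  | nil => simp
  | cons p rest ih =>
    by_cases h : pvKey p = ""
    · rw [List.foldl_cons, List.filter_cons, if_pos h,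
        if_neg (show ¬(decide (pvKey p ≠ "") = true) from by simp [h])]
      exact ih d
    · rw [List.foldl_cons, List.filter_cons, if_neg h,
        if_pos (show (decide (pvKey p ≠ "") = true) from by simp [h]), List.foldl_cons]
      exact ih _

lemma getD_foldM (l : List (List (String × String))) (d : PySem.Dict String (List (List (String × String)))) (c : String) :
    (l.foldl (fun d p => d.modify (pvKey p) [] (fun v => v ++ [p])) d).getD c []
      = d.getD c [] ++ l.filter (fun p => pvKey p == c) := by
  have h := PySem.Dict.getD_foldl_modify_append (l.map (fun p => (pvKey p, p))) d c
  rw [List.foldl_map] at h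
  simpa [List.filter_map, Function.comp_def, List.map_id] using h

-- ===== VERDICT (by name: the statement is the Claim_ definition above) =====
theorem build_player_index_spec : Claim_equal_build_player_index := by
  intro players _
  unfold Spec_build_player_index build_player_index build_player_index_alt
  rw [foldA_eq_foldM]
  set D := (players.filter (fun p => pvKey p ≠ "")).foldl
      (fun d p => d.modify (pvKey p) [] (fun v => v ++ [p])) PySem.Dict.empty with hD
  have hl : (players.filter (fun p => pvKey p ≠ "")).map pvKey
      = (players.map pvKey).filter (fun k => k ≠ "") := by
    rw [List.filter_map]
    simp [Function.comp_def]
  have hkeys : D.keys = PySem.List.dedup ((players.map pvKey).filter (fun k => k ≠ "")) := by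
    rw [hD, PySem.Dict.keys_foldl_modify_key (f := fun _ p v => v ++ [p]), hl,
      PySem.List.dedup_eq_ofList]
    rfl
  have hnd : D.keys.Nodup := by
    rw [hD]
    exact PySem.Dict.nodup_keys_foldl_modify_key _ _ _ (fun _ p v => v ++ [p]) _ (by simp [PySem.Dict.keys_empty])
  rw [PySem.Dict.items_eq_map_keys D hnd [], hkeys]
  apply List.map_congr_left
  intro k hk
  have hkne : k ≠ "" := by
    have h2 : k ∈ (players.map pvKey).filter (fun k => k ≠ "") :=
      (PySem.List.mem_dedup _ _).mp hk
    simpa using (List.mem_filter.mp h2).2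
  have hg := getD_foldM (players.filter (fun p => pvKey p ≠ "")) PySem.Dict.empty k
  rw [hD, hg]
  simp only [PySem.Dict.getD_empty, List.nil_append]
  congr 1
  rw [List.filter_filter]
  apply List.filter_congr
  intro p _
  by_cases hpk : pvKey p = k
  · simp [hpk, hkne]
  · simp [hpk]
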